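-- pv_equiv track=rewrite | github.com/DevanshuBhanapntt/St2_redhat_3.8 | st2_install/NTT_packs/stackstorm-ntt_monitoring/actions/check_power_supply.py | check_power_supply_ok
-- ===== SOURCE A (Python) =====
-- def check_power_supply_ok(power_supply_output, model_id):
--     Power_Supply_Okay = True
--
--     if '6509' in model_id or '6504' in model_id or '6506' in model_id:
--         for line in power_supply_output:
--             if 'power-output-fail: fail' in line.lower() or 'power-output-fail: bad' in line.lower() or 'power-output-fail: no input power' in line.lower() or 'power-output-fail: off' in line.lower():
--                 Power_Supply_Okay = False
--     if '3850' in model_id or '5020' in model_id or '3750' in model_id or '4506' in model_id or '4507' in model_id or '3560' in model_id: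
--         for line in power_supply_output:
--             if 'fail' in line.lower() or 'bad' in line.lower() or 'no input power' in line.lower() or 'unavail' in line.lower() or 'off' in line.lower():
--                 Power_Supply_Okay = False
--     if '2960' in model_id or '2950' in model_id or '3550' in model_id:
--         for line in power_supply_output:
--             if 'power' in line.lower() and ('fail' in line.lower() or 'bad' in line.lower() or 'no input power' in line.lower() or 'unavail' in line.lower() or 'off' in line.lower()):
--                 Power_Supply_Okay = False
--     if '4948' in model_id or '4510' in model_id or '4500' in model_id:
--         for line in power_supply_output:
--             if 'ps' in line.lower() and ('fail' in line.lower() or 'bad' in line.lower() or 'no input power' in line.lower() or 'unavail' in line.lower() or 'off' in line.lower()):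
--                 Power_Supply_Okay = False
--     if '5548' in model_id or '5596' in model_id or '5612' in model_id or '5624' in model_id:
--         for line in power_supply_output:
--             if 'pac' in line.lower() and ('fail' in line.lower() or 'bad' in line.lower() or 'no input power' in line.lower() or 'unavail' in line.lower() or 'off' in line.lower()):
--                 Power_Supply_Okay = False
--     if '7009' in model_id or '7010' in model_id or '7018' in model_id or '7206' in model_id or '7004' in model_id or 'C9300-24P' in model_id:
--         for line in power_supply_output:
--             if 'ac' in line.lower() and ('fail' in line.lower() or 'bad' in line.lower() or 'no input power' in line.lower() or 'unavail' in line.lower() or 'off' in line.lower() or 'fault' in line.lower()):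
--                 Power_Supply_Okay = False
--     if '3925' in model_id or '3945' in model_id or '2951' in model_id or '2911' in model_id or '2900' in model_id or 'C9300-48P' in model_id or 'WS-C3650-48PD' in model_id or 'C9500-48Y4C' in model_id or 'C9500-40X' in model_id or 'C9300-48U' in model_id:
--         for line in power_supply_output:
--             if 'output status' in line.lower() and ('fail' in line.lower() or 'bad' in line.lower() or 'no input power' in line.lower() or 'unavail' in line.lower() or 'off' in line.lower()):
--                 Power_Supply_Okay = False
--     if 'ASR' in model_id:
--         for line in power_supply_output:
--             if ('pem vout' in line.lower() and '0 v' in line.lower()) or ('pem iout' in line.lower() and '0 a' in line.lower()):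
--                 Power_Supply_Okay = False
--     return Power_Supply_Okay
-- ===== SOURCE B (Python) =====
-- # Loop-inverted bitmask implementation: one pass over the lines builds a bitmask of the
-- # failure classes any line signals; the model id is turned once into a bitmask of the
-- # failure classes that apply to it; the supply is OK iff the two masks do not intersect.
--
-- def _bits(b0, b1, b2, b3, b4, b5, b6, b7):
--     return ((1 if b0 else 0) | (2 if b1 else 0) | (4 if b2 else 0) | (8 if b3 else 0)
--             | (16 if b4 else 0) | (32 if b5 else 0) | (64 if b6 else 0) | (128 if b7 else 0))
--
-- def _line_mask(l):
--     # l is the already-lowercased line; bit i set = line signals failure class i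
--     fail = 'fail' in l or 'bad' in l or 'no input power' in l or 'unavail' in l or 'off' in l
--     return _bits(
--         'power-output-fail: fail' in l or 'power-output-fail: bad' in l
--             or 'power-output-fail: no input power' in l or 'power-output-fail: off' in l,
--         fail,
--         'power' in l and fail,
--         'ps' in l and fail,
--         'pac' in l and fail,
--         'ac' in l and (fail or 'fault' in l),
--         'output status' in l and fail,
--         ('pem vout' in l and '0 v' in l) or ('pem iout' in l and '0 a' in l))
--
-- def _model_mask(model_id):
--     # bit i set = failure class i applies to this model
--     return _bits(
--         '6509' in model_id or '6504' in model_id or '6506' in model_id,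
--         '3850' in model_id or '5020' in model_id or '3750' in model_id
--             or '4506' in model_id or '4507' in model_id or '3560' in model_id,
--         '2960' in model_id or '2950' in model_id or '3550' in model_id,
--         '4948' in model_id or '4510' in model_id or '4500' in model_id,
--         '5548' in model_id or '5596' in model_id or '5612' in model_id or '5624' in model_id,
--         '7009' in model_id or '7010' in model_id or '7018' in model_id
--             or '7206' in model_id or '7004' in model_id or 'C9300-24P' in model_id,
--         '3925' in model_id or '3945' in model_id or '2951' in model_id or '2911' in model_id
--             or '2900' in model_id or 'C9300-48P' in model_id or 'WS-C3650-48PD' in model_id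
--             or 'C9500-48Y4C' in model_id or 'C9500-40X' in model_id or 'C9300-48U' in model_id,
--         'ASR' in model_id)
--
-- def check_power_supply_ok(power_supply_output, model_id):
--     triggered = 0
--     for line in power_supply_output:
--         triggered |= _line_mask(line.lower())
--     return (_model_mask(model_id) & triggered) == 0
-- ===== Notes on version B (the rewrite author's own statement) =====
-- stated objective: alternative
-- what changed: Inverts the traversal: instead of eight model-guarded loops over the lines each toggling a flag, B makes one pass over the lines building a bitmask of signalled failure classes, turns the model id into a bitmask of applicable classes, and returns whether the two masks are disjoint.
import Mathlib
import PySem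

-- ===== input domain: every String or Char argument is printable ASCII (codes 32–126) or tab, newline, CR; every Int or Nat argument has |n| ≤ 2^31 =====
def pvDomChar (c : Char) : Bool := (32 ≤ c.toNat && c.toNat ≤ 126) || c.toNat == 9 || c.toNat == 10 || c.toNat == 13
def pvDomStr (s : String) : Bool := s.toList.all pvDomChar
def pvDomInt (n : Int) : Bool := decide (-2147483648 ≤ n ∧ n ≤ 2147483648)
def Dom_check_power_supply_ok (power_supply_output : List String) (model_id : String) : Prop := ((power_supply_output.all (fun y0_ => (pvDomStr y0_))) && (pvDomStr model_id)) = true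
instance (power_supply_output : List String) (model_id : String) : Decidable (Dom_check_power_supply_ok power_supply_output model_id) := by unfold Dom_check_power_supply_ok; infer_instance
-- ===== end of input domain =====

-- B inverts A's rule-major traversal: one pass over the lines builds a bitmask of signalled
-- failure classes, the model id becomes a bitmask of applicable classes, and OK = the masks
-- do not intersect (alternative decomposition; same return value).

-- ===== PORT A ===== (literal transliteration: a mutable flag threaded through eight guarded loops)
def check_power_supply_ok (power_supply_output : List String) (model_id : String) : Bool :=
  let ok := true
  let ok := if PySem.Str.isIn "6509" model_id || PySem.Str.isIn "6504" model_id || PySem.Str.isIn "6506" model_id then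
      power_supply_output.foldl (fun acc line =>
        if PySem.Str.isIn "power-output-fail: fail" (PySem.Str.lower line) || PySem.Str.isIn "power-output-fail: bad" (PySem.Str.lower line) || PySem.Str.isIn "power-output-fail: no input power" (PySem.Str.lower line) || PySem.Str.isIn "power-output-fail: off" (PySem.Str.lower line) then false else acc) ok
    else ok
  let ok := if PySem.Str.isIn "3850" model_id || PySem.Str.isIn "5020" model_id || PySem.Str.isIn "3750" model_id || PySem.Str.isIn "4506" model_id || PySem.Str.isIn "4507" model_id || PySem.Str.isIn "3560" model_id then
      power_supply_output.foldl (fun acc line =>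
        if PySem.Str.isIn "fail" (PySem.Str.lower line) || PySem.Str.isIn "bad" (PySem.Str.lower line) || PySem.Str.isIn "no input power" (PySem.Str.lower line) || PySem.Str.isIn "unavail" (PySem.Str.lower line) || PySem.Str.isIn "off" (PySem.Str.lower line) then false else acc) ok
    else ok
  let ok := if PySem.Str.isIn "2960" model_id || PySem.Str.isIn "2950" model_id || PySem.Str.isIn "3550" model_id then
      power_supply_output.foldl (fun acc line =>
        if PySem.Str.isIn "power" (PySem.Str.lower line) && (PySem.Str.isIn "fail" (PySem.Str.lower line) || PySem.Str.isIn "bad" (PySem.Str.lower line) || PySem.Str.isIn "no input power" (PySem.Str.lower line) || PySem.Str.isIn "unavail" (PySem.Str.lower line) || PySem.Str.isIn "off" (PySem.Str.lower line)) then false else acc) ok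
    else ok
  let ok := if PySem.Str.isIn "4948" model_id || PySem.Str.isIn "4510" model_id || PySem.Str.isIn "4500" model_id then
      power_supply_output.foldl (fun acc line =>
        if PySem.Str.isIn "ps" (PySem.Str.lower line) && (PySem.Str.isIn "fail" (PySem.Str.lower line) || PySem.Str.isIn "bad" (PySem.Str.lower line) || PySem.Str.isIn "no input power" (PySem.Str.lower line) || PySem.Str.isIn "unavail" (PySem.Str.lower line) || PySem.Str.isIn "off" (PySem.Str.lower line)) then false else acc) ok
    else ok
  let ok := if PySem.Str.isIn "5548" model_id || PySem.Str.isIn "5596" model_id || PySem.Str.isIn "5612" model_id || PySem.Str.isIn "5624" model_id then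
      power_supply_output.foldl (fun acc line =>
        if PySem.Str.isIn "pac" (PySem.Str.lower line) && (PySem.Str.isIn "fail" (PySem.Str.lower line) || PySem.Str.isIn "bad" (PySem.Str.lower line) || PySem.Str.isIn "no input power" (PySem.Str.lower line) || PySem.Str.isIn "unavail" (PySem.Str.lower line) || PySem.Str.isIn "off" (PySem.Str.lower line)) then false else acc) ok
    else ok
  let ok := if PySem.Str.isIn "7009" model_id || PySem.Str.isIn "7010" model_id || PySem.Str.isIn "7018" model_id || PySem.Str.isIn "7206" model_id || PySem.Str.isIn "7004" model_id || PySem.Str.isIn "C9300-24P" model_id then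
      power_supply_output.foldl (fun acc line =>
        if PySem.Str.isIn "ac" (PySem.Str.lower line) && (PySem.Str.isIn "fail" (PySem.Str.lower line) || PySem.Str.isIn "bad" (PySem.Str.lower line) || PySem.Str.isIn "no input power" (PySem.Str.lower line) || PySem.Str.isIn "unavail" (PySem.Str.lower line) || PySem.Str.isIn "off" (PySem.Str.lower line) || PySem.Str.isIn "fault" (PySem.Str.lower line)) then false else acc) ok
    else ok
  let ok := if PySem.Str.isIn "3925" model_id || PySem.Str.isIn "3945" model_id || PySem.Str.isIn "2951" model_id || PySem.Str.isIn "2911" model_id || PySem.Str.isIn "2900" model_id || PySem.Str.isIn "C9300-48P" model_id || PySem.Str.isIn "WS-C3650-48PD" model_id || PySem.Str.isIn "C9500-48Y4C" model_id || PySem.Str.isIn "C9500-40X" model_id || PySem.Str.isIn "C9300-48U" model_id then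
      power_supply_output.foldl (fun acc line =>
        if PySem.Str.isIn "output status" (PySem.Str.lower line) && (PySem.Str.isIn "fail" (PySem.Str.lower line) || PySem.Str.isIn "bad" (PySem.Str.lower line) || PySem.Str.isIn "no input power" (PySem.Str.lower line) || PySem.Str.isIn "unavail" (PySem.Str.lower line) || PySem.Str.isIn "off" (PySem.Str.lower line)) then false else acc) ok
    else ok
  let ok := if PySem.Str.isIn "ASR" model_id then
      power_supply_output.foldl (fun acc line =>
        if (PySem.Str.isIn "pem vout" (PySem.Str.lower line) && PySem.Str.isIn "0 v" (PySem.Str.lower line)) || (PySem.Str.isIn "pem iout" (PySem.Str.lower line) && PySem.Str.isIn "0 a" (PySem.Str.lower line)) then false else acc) ok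
    else ok
  ok

-- ===== PORT B ===== (bitmask of failure classes, folded over the lines once)
def pvBits (b0 b1 b2 b3 b4 b5 b6 b7 : Bool) : Nat :=
  (if b0 then 1 else 0) ||| (if b1 then 2 else 0) ||| (if b2 then 4 else 0) ||| (if b3 then 8 else 0) |||
  (if b4 then 16 else 0) ||| (if b5 then 32 else 0) ||| (if b6 then 64 else 0) ||| (if b7 then 128 else 0)

-- l is the already-lowercased line; bit i set = line signals failure class i
def pvLineMask (l : String) : Nat :=
  let fail := PySem.Str.isIn "fail" l || PySem.Str.isIn "bad" l || PySem.Str.isIn "no input power" l || PySem.Str.isIn "unavail" l || PySem.Str.isIn "off" l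
  pvBits
    (PySem.Str.isIn "power-output-fail: fail" l || PySem.Str.isIn "power-output-fail: bad" l || PySem.Str.isIn "power-output-fail: no input power" l || PySem.Str.isIn "power-output-fail: off" l)
    fail
    (PySem.Str.isIn "power" l && fail)
    (PySem.Str.isIn "ps" l && fail)
    (PySem.Str.isIn "pac" l && fail)
    (PySem.Str.isIn "ac" l && (fail || PySem.Str.isIn "fault" l))
    (PySem.Str.isIn "output status" l && fail)
    ((PySem.Str.isIn "pem vout" l && PySem.Str.isIn "0 v" l) || (PySem.Str.isIn "pem iout" l && PySem.Str.isIn "0 a" l))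

-- bit i set = failure class i applies to this model
def pvModelMask (model_id : String) : Nat :=
  pvBits
    (PySem.Str.isIn "6509" model_id || PySem.Str.isIn "6504" model_id || PySem.Str.isIn "6506" model_id)
    (PySem.Str.isIn "3850" model_id || PySem.Str.isIn "5020" model_id || PySem.Str.isIn "3750" model_id || PySem.Str.isIn "4506" model_id || PySem.Str.isIn "4507" model_id || PySem.Str.isIn "3560" model_id)
    (PySem.Str.isIn "2960" model_id || PySem.Str.isIn "2950" model_id || PySem.Str.isIn "3550" model_id)
    (PySem.Str.isIn "4948" model_id || PySem.Str.isIn "4510" model_id || PySem.Str.isIn "4500" model_id)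
    (PySem.Str.isIn "5548" model_id || PySem.Str.isIn "5596" model_id || PySem.Str.isIn "5612" model_id || PySem.Str.isIn "5624" model_id)
    (PySem.Str.isIn "7009" model_id || PySem.Str.isIn "7010" model_id || PySem.Str.isIn "7018" model_id || PySem.Str.isIn "7206" model_id || PySem.Str.isIn "7004" model_id || PySem.Str.isIn "C9300-24P" model_id)
    (PySem.Str.isIn "3925" model_id || PySem.Str.isIn "3945" model_id || PySem.Str.isIn "2951" model_id || PySem.Str.isIn "2911" model_id || PySem.Str.isIn "2900" model_id || PySem.Str.isIn "C9300-48P" model_id || PySem.Str.isIn "WS-C3650-48PD" model_id || PySem.Str.isIn "C9500-48Y4C" model_id || PySem.Str.isIn "C9500-40X" model_id || PySem.Str.isIn "C9300-48U" model_id)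
    (PySem.Str.isIn "ASR" model_id)

def check_power_supply_ok_alt (power_supply_output : List String) (model_id : String) : Bool :=
  let triggered := power_supply_output.foldl (fun acc line => acc ||| pvLineMask (PySem.Str.lower line)) 0
  pvModelMask model_id &&& triggered == 0

-- ===== PRECONDITION & SPEC =====
def Spec_check_power_supply_ok (power_supply_output : List String) (model_id : String) (out : Bool) : Prop := out = check_power_supply_ok_alt power_supply_output model_id
instance (power_supply_output : List String) (model_id : String) (out : Bool) : Decidable (Spec_check_power_supply_ok power_supply_output model_id out) := by unfold Spec_check_power_supply_ok; infer_instance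

-- ===== CLAIM (what is proved, stated in full; the proofs are below) =====
def Claim_equal_check_power_supply_ok : Prop := ∀ (power_supply_output : List String) (model_id : String), Dom_check_power_supply_ok power_supply_output model_id → Spec_check_power_supply_ok power_supply_output model_id (check_power_supply_ok power_supply_output model_id)

-- ===== LEMMAS AND PROOFS =====

-- Bitmask algebra on 8-bit masks built from Booleans.
theorem pvBits_or : ∀ (a0 a1 a2 a3 a4 a5 a6 a7 b0 b1 b2 b3 b4 b5 b6 b7 : Bool),
    pvBits a0 a1 a2 a3 a4 a5 a6 a7 ||| pvBits b0 b1 b2 b3 b4 b5 b6 b7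
      = pvBits (a0 || b0) (a1 || b1) (a2 || b2) (a3 || b3) (a4 || b4) (a5 || b5) (a6 || b6) (a7 || b7) := by
  decide

theorem pvBits_and_eq_zero : ∀ (a0 a1 a2 a3 a4 a5 a6 a7 b0 b1 b2 b3 b4 b5 b6 b7 : Bool),
    (pvBits a0 a1 a2 a3 a4 a5 a6 a7 &&& pvBits b0 b1 b2 b3 b4 b5 b6 b7 == 0)
      = !((a0 && b0) || (a1 && b1) || (a2 && b2) || (a3 && b3) || (a4 && b4) || (a5 && b5) || (a6 && b6) || (a7 && b7)) := by
  decide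

-- Folding bitmask-or over a list is pointwise 'any' on each bit.
theorem pv_fold_bits (p0 p1 p2 p3 p4 p5 p6 p7 : String → Bool) (lines : List String)
    (c0 c1 c2 c3 c4 c5 c6 c7 : Bool) :
    lines.foldl (fun acc l => acc ||| pvBits (p0 l) (p1 l) (p2 l) (p3 l) (p4 l) (p5 l) (p6 l) (p7 l))
        (pvBits c0 c1 c2 c3 c4 c5 c6 c7)
      = pvBits (c0 || lines.any p0) (c1 || lines.any p1) (c2 || lines.any p2) (c3 || lines.any p3)
          (c4 || lines.any p4) (c5 || lines.any p5) (c6 || lines.any p6) (c7 || lines.any p7) := by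
  induction lines generalizing c0 c1 c2 c3 c4 c5 c6 c7 with
  | nil => simp
  | cons h t ih =>
    simp only [List.foldl_cons, List.any_cons, pvBits_or, ih, Bool.or_assoc]

-- The same, started from the literal 0 accumulator of the port.
theorem pv_fold_bits0 (p0 p1 p2 p3 p4 p5 p6 p7 : String → Bool) (lines : List String) :
    lines.foldl (fun acc l => acc ||| pvBits (p0 l) (p1 l) (p2 l) (p3 l) (p4 l) (p5 l) (p6 l) (p7 l)) 0
      = pvBits (lines.any p0) (lines.any p1) (lines.any p2) (lines.any p3)
          (lines.any p4) (lines.any p5) (lines.any p6) (lines.any p7) := by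
  have h0 : (0 : Nat) = pvBits false false false false false false false false := by decide
  rw [h0, pv_fold_bits]
  simp

-- A's 'for line: if p line: flag = False' loop equals 'flag && no line satisfies p'.
theorem pv_flag_loop (p : String → Bool) (lines : List String) (b : Bool) :
    lines.foldl (fun acc l => if p l then false else acc) b = (b && !(lines.any p)) := by
  induction lines generalizing b with
  | nil => simp
  | cons h t ih =>
    simp only [List.foldl_cons, List.any_cons, ih]
    cases p h <;> simp

-- A guarded block folds into one conjunct.
theorem pv_guard (g b a : Bool) : (if g then (b && !a) else b) = (b && !(g && a)) := by
  cases g <;> cases b <;> cases a <;> rfl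

theorem check_power_supply_ok_eq_alt (power_supply_output : List String) (model_id : String) :
    check_power_supply_ok power_supply_output model_id = check_power_supply_ok_alt power_supply_output model_id := by
  simp only [check_power_supply_ok, pv_flag_loop]
  simp only [pv_guard]
  simp only [check_power_supply_ok_alt, pvLineMask, pvModelMask, pv_fold_bits0, pvBits_and_eq_zero]
  simp only [Bool.true_and, Bool.not_or, Bool.and_assoc, Bool.or_assoc]

-- ===== VERDICT (by name: the statement is the Claim_ definition above) =====
theorem check_power_supply_ok_spec : Claim_equal_check_power_supply_ok := by
  intro lines mid _
  exact check_power_supply_ok_eq_alt lines mid
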